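-- pv_equiv track=rewrite | github.com/ninix07/Complexity-Labs | Lab-2/compare_sorts.py | worst_case_merge_arr
-- ===== SOURCE A (Python) =====
-- def worst_case_merge_arr(arr,sort=True):
--     n = len(arr)
--     if n <= 1:
--         return arr
--
--     if n == 2:
--         arr[0], arr[1] = arr[1], arr[0]
--         return arr
--     if sort:
--         arr = sorted(arr)
--     else:
--         arr = arr.copy()
--     left_arr = arr[::2]
--     right_arr = arr[1::2]
--     return worst_case_merge_arr(left_arr,sort=False) + worst_case_merge_arr(right_arr,sort=False)
-- ===== SOURCE B (Python) =====
-- def worst_case_merge_arr(arr, sort=True):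
--     n = len(arr)
--     if n <= 1:
--         return arr
--     if n == 2:
--         arr[0], arr[1] = arr[1], arr[0]
--         return arr
--     base = sorted(arr) if sort else arr.copy()
--     out = []
--     stack = [list(range(n))]
--     while stack:
--         idxs = stack.pop()
--         if len(idxs) <= 1:
--             for i in idxs:
--                 out.append(base[i])
--         elif len(idxs) == 2:
--             out.append(base[idxs[1]])
--             out.append(base[idxs[0]])
--         else:
--             stack.append(idxs[1::2])
--             stack.append(idxs[0::2])
--     return out
-- ===== Notes on version B (the rewrite author's own statement) =====
-- stated objective: alternative
-- what changed: Replaces A's top-down recursion by an iterative worklist: a stack of index sub-ranges over the prepared base list is split even/odd and emitted left-to-right, assembling the same permutation with an explicit loop instead of recursion.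
import Mathlib
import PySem

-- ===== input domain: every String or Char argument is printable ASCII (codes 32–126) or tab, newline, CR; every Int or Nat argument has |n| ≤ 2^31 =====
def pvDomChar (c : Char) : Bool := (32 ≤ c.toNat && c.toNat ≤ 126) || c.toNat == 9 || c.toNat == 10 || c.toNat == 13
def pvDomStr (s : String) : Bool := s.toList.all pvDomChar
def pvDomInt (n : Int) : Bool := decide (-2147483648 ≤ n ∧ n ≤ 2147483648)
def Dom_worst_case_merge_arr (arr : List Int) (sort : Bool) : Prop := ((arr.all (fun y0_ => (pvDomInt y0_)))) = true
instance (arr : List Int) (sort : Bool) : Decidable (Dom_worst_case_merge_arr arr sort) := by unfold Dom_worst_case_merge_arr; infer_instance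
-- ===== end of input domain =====

-- B replaces A's recursion by an explicit stack of index ranges over the prepared base list
-- (same return value; in Python both mutate arr in place only in the n == 2 top-level case).
-- Both ports use a fuel parameter only as a structural totality guard; fuel is always sufficient.

-- ===== PORT A =====
-- xs[::2] (step-2 slice from index 0); exact for a step-2 slice covering the whole list.
def everyOther {α : Type} : List α → List α
  | [] => []
  | [x] => [x]
  | x :: _ :: xs => x :: everyOther xs

-- A's recursion, guarded by fuel (fuel ≥ arr.length always suffices; the 0 case is unreachable)
def wcGo (fuel : Nat) (arr : List Int) (sort : Bool) : List Int :=
  match fuel with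
  | 0 => arr
  | f + 1 =>
    if arr.length ≤ 1 then arr
    else if arr.length = 2 then
      -- arr[0], arr[1] = arr[1], arr[0]; return arr
      [PySem.List.pyGetD arr 1 0, PySem.List.pyGetD arr 0 0]
    else
      -- arr = sorted(arr) if sort else arr.copy()  (the rebound arr, inlined at both uses)
      wcGo f (everyOther (if sort then PySem.List.sorted arr (fun x => x) false else arr)) false ++
        wcGo f (everyOther (if sort then PySem.List.sorted arr (fun x => x) false else arr).tail) false

def worst_case_merge_arr (arr : List Int) (sort : Bool) : List Int :=
  wcGo arr.length arr sort

-- ===== PORT B =====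
-- the while loop of Source B: stack of index lists (head = top of stack), output accumulator;
-- fuel ≥ Σ_r 3^(len r) over the stack always suffices, so the 0 case is unreachable
def bLoopGo (fuel : Nat) (base : List Int) (stack : List (List Int)) (out : List Int) : List Int :=
  match fuel with
  | 0 => out
  | f + 1 =>
    match stack with
    | [] => out
    | idxs :: rest =>
      if idxs.length ≤ 1 then
        bLoopGo f base rest (out ++ idxs.map (fun i => PySem.List.pyGetD base i 0))
      else if idxs.length = 2 then
        bLoopGo f base rest (out ++ [PySem.List.pyGetD base (PySem.List.pyGetD idxs 1 0) 0,
                                     PySem.List.pyGetD base (PySem.List.pyGetD idxs 0 0) 0])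
      else
        bLoopGo f base (everyOther idxs :: everyOther idxs.tail :: rest) out

def worst_case_merge_arr_alt (arr : List Int) (sort : Bool) : List Int :=
  if arr.length ≤ 1 then arr
  else if arr.length = 2 then
    [PySem.List.pyGetD arr 1 0, PySem.List.pyGetD arr 0 0]
  else
    bLoopGo (3 ^ arr.length) (if sort then PySem.List.sorted arr (fun x => x) false else arr)
      [PySem.List.pyRange 0 (arr.length : Int) 1] []

-- ===== PRECONDITION & SPEC =====
def Spec_worst_case_merge_arr (arr : List Int) (sort : Bool) (out : List Int) : Prop := out = worst_case_merge_arr_alt arr sort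
instance (arr : List Int) (sort : Bool) (out : List Int) : Decidable (Spec_worst_case_merge_arr arr sort out) := by unfold Spec_worst_case_merge_arr; infer_instance

-- ===== CLAIM (what is proved, stated in full; the proofs are below) =====
def Claim_equal_worst_case_merge_arr : Prop := ∀ (arr : List Int) (sort : Bool), Dom_worst_case_merge_arr arr sort → Spec_worst_case_merge_arr arr sort (worst_case_merge_arr arr sort)

-- ===== LEMMAS AND PROOFS =====
theorem length_everyOther {α : Type} (l : List α) :
    (everyOther l).length = (l.length + 1) / 2 := by
  fun_induction everyOther l <;> (simp [*]; try omega)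

theorem length_prep (arr : List Int) (sort : Bool) :
    (if sort then PySem.List.sorted arr (fun x => x) false else arr).length = arr.length := by
  split
  · simp [PySem.List.length_sorted]
  · rfl

-- fuel irrelevance for A's recursion: any fuel ≥ arr.length computes the same value
theorem wcGo_congr (f1 : Nat) : ∀ (f2 : Nat) (arr : List Int) (s : Bool),
    arr.length ≤ f1 → arr.length ≤ f2 → wcGo f1 arr s = wcGo f2 arr s := by
  induction f1 with
  | zero =>
    intro f2 arr s h1 _
    have : arr = [] := List.eq_nil_of_length_eq_zero (by omega)
    subst this
    cases f2 <;> simp [wcGo]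
  | succ f ih =>
    intro f2 arr s h1 h2
    cases f2 with
    | zero =>
      have : arr = [] := List.eq_nil_of_length_eq_zero (by omega)
      subst this
      simp [wcGo]
    | succ g =>
      show wcGo (f + 1) arr s = wcGo (g + 1) arr s
      rw [wcGo, wcGo]
      by_cases hA : arr.length ≤ 1
      · simp [hA]
      · by_cases hB : arr.length = 2
        · simp [hB]
        · simp only [if_neg hA, if_neg hB]
          have hl1 : (everyOther (if s then PySem.List.sorted arr (fun x => x) false else arr)).length = (arr.length + 1) / 2 := by
            rw [length_everyOther, length_prep]
          have hl2 : (everyOther (if s then PySem.List.sorted arr (fun x => x) false else arr).tail).length = (arr.length - 1 + 1) / 2 := by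
            rw [length_everyOther, List.length_tail, length_prep]
          rw [ih g _ false (by omega) (by omega), ih g _ false (by omega) (by omega)]

theorem A_small (l : List Int) (s : Bool) (h : l.length ≤ 1) : worst_case_merge_arr l s = l := by
  unfold worst_case_merge_arr
  cases l with
  | nil => simp [wcGo]
  | cons a t =>
    cases t with
    | nil => simp [wcGo]
    | cons b u => simp at h

theorem A_two (l : List Int) (s : Bool) (h : l.length = 2) :
    worst_case_merge_arr l s = [PySem.List.pyGetD l 1 0, PySem.List.pyGetD l 0 0] := by
  unfold worst_case_merge_arr
  rw [h, wcGo]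
  simp [h]

theorem A_big (l : List Int) (h1 : ¬ l.length ≤ 1) (h2 : ¬ l.length = 2) :
    worst_case_merge_arr l false =
      worst_case_merge_arr (everyOther l) false ++ worst_case_merge_arr (everyOther l.tail) false := by
  unfold worst_case_merge_arr
  have hn : l.length = (l.length - 1) + 1 := by omega
  rw [hn, wcGo]
  simp only [if_neg h1, if_neg h2, if_neg (Bool.false_ne_true)]
  have hc1 : (everyOther l).length ≤ l.length - 1 := by rw [length_everyOther]; omega
  have hc2 : (everyOther l.tail).length ≤ l.length - 1 := by
    rw [length_everyOther, List.length_tail]; omega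
  rw [wcGo_congr _ (everyOther l).length _ false hc1 (le_refl _),
      wcGo_congr _ (everyOther l.tail).length _ false hc2 (le_refl _)]

theorem everyOther_map {α β : Type} (f : α → β) (l : List α) :
    everyOther (l.map f) = (everyOther l).map f := by
  fun_induction everyOther l <;> simp [everyOther, *]

-- the stack measure bLoopGo's fuel must dominate
def stackMeasure (stack : List (List Int)) : Nat :=
  (stack.map (fun r => 3 ^ r.length)).sum

theorem pow3_split (n : Nat) (h : 3 ≤ n) : 3 ^ ((n + 1) / 2) + 3 ^ (n / 2) < 3 ^ n := by
  have e1 : 3 ^ ((n + 1) / 2) ≤ 3 ^ (n - 1) := Nat.pow_le_pow_right (by norm_num) (by omega)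
  have e2 : 3 ^ (n / 2) ≤ 3 ^ (n - 1) := Nat.pow_le_pow_right (by norm_num) (by omega)
  have e3 : 3 ^ n = 3 * 3 ^ (n - 1) := by rw [← pow_succ']; congr 1; omega
  have e4 : 0 < 3 ^ (n - 1) := Nat.pow_pos (by norm_num)
  omega

theorem stackMeasure_cons (idxs : List Int) (rest : List (List Int)) :
    stackMeasure (idxs :: rest) = 3 ^ idxs.length + stackMeasure rest := by
  simp [stackMeasure]

theorem stackMeasure_split (idxs : List Int) (rest : List (List Int)) (h : 3 ≤ idxs.length) :
    stackMeasure (everyOther idxs :: everyOther idxs.tail :: rest) + 1 ≤ stackMeasure (idxs :: rest) := by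
  simp only [stackMeasure_cons, length_everyOther, List.length_tail]
  have hp := pow3_split idxs.length h
  have he : (3 : Nat) ^ ((idxs.length - 1 + 1) / 2) = 3 ^ (idxs.length / 2) := by
    congr 1; omega
  rw [he]; omega

-- each popped index range contributes exactly A's recursion on the selected elements
theorem bLoop_eq (f : Nat) : ∀ (base : List Int) (stack : List (List Int)) (out : List Int),
    stackMeasure stack ≤ f →
    bLoopGo f base stack out =
      out ++ (stack.map (fun r =>
        worst_case_merge_arr (r.map (fun i => PySem.List.pyGetD base i 0)) false)).flatten := by
  induction f with
  | zero =>
    intro base stack out h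
    cases stack with
    | nil => simp [bLoopGo]
    | cons idxs rest =>
      exfalso
      have : 0 < 3 ^ idxs.length := Nat.pow_pos (by norm_num)
      rw [stackMeasure_cons] at h
      omega
  | succ f ih =>
    intro base stack out h
    cases stack with
    | nil => simp [bLoopGo]
    | cons idxs rest =>
      rw [stackMeasure_cons] at h
      have hpos : 0 < 3 ^ idxs.length := Nat.pow_pos (by norm_num)
      rw [bLoopGo]
      by_cases h1 : idxs.length ≤ 1
      · simp only [if_pos h1]
        rw [ih base rest _ (by omega)]
        simp only [List.map_cons, List.flatten_cons, ← List.append_assoc]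
        rw [A_small _ false (by simpa using h1)]
      · by_cases h2 : idxs.length = 2
        · obtain ⟨a, b, rfl⟩ := List.length_eq_two.mp h2
          simp only [if_neg h1, if_pos h2]
          rw [ih base rest _ (by omega)]
          simp only [List.map_cons, List.flatten_cons, ← List.append_assoc]
          rw [A_two _ false (by simp)]
          simp [PySem.List.pyGetD, PySem.List.pyGet?, PySem.List.pyIdx?]
        · simp only [if_neg h1, if_neg h2]
          have hm := stackMeasure_split idxs rest (by omega)
          simp only [stackMeasure_cons] at hm
          rw [ih base _ _ (by simp only [stackMeasure_cons]; omega)]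
          simp only [List.map_cons, List.flatten_cons, ← List.append_assoc]
          congr 1
          rw [A_big (idxs.map (fun i => PySem.List.pyGetD base i 0)) (by simpa using h1) (by simpa using h2)]
          rw [everyOther_map, ← List.map_tail, everyOther_map]
          simp

theorem map_range_getD (base : List Int) :
    (PySem.List.pyRange 0 (base.length : Int) 1).map (fun i => PySem.List.pyGetD base i 0) = base := by
  rw [PySem.List.pyRange_one]
  simp only [Int.sub_zero, Int.toNat_natCast, List.map_map]
  apply List.ext_getElem
  · simp
  · intro n h1 h2
    simp only [List.getElem_map, List.getElem_range, Function.comp]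
    rw [show ((0 : Int) + (n : Nat) : Int) = ((n : Nat) : Int) by omega, PySem.List.pyGetD_natCast]
    simp at h1
    simp [List.getD_eq_getElem?_getD, List.getElem?_eq_getElem h1]

-- ===== VERDICT (by name: the statement is the Claim_ definition above) =====
theorem worst_case_merge_arr_spec : Claim_equal_worst_case_merge_arr := by
  intro arr sort _
  unfold Spec_worst_case_merge_arr
  by_cases h1 : arr.length ≤ 1
  · rw [A_small _ _ h1, worst_case_merge_arr_alt]; simp [h1]
  · by_cases h2 : arr.length = 2
    · rw [A_two _ _ h2, worst_case_merge_arr_alt]; simp [h2]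
    · rw [worst_case_merge_arr_alt]
      simp only [if_neg h1, if_neg h2]
      set base := (if sort then PySem.List.sorted arr (fun x => x) false else arr) with hbase
      have hlen : base.length = arr.length := length_prep arr sort
      rw [bLoop_eq (3 ^ arr.length) base _ []
        (by simp [stackMeasure, PySem.List.length_pyRange_one])]
      simp only [List.map_cons, List.map_nil, List.flatten_cons, List.flatten_nil,
        List.append_nil, List.nil_append]
      rw [← hlen, map_range_getD]
      rw [A_big base (by omega) (by omega)]
      conv_lhs => rw [show worst_case_merge_arr arr sort = wcGo arr.length arr sort from rfl]
      rw [show arr.length = (arr.length - 1) + 1 by omega, wcGo]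
      simp only [if_neg h1, if_neg h2, ← hbase]
      have hc1 : (everyOther base).length ≤ arr.length - 1 := by
        rw [length_everyOther, hlen]; omega
      have hc2 : (everyOther base.tail).length ≤ arr.length - 1 := by
        rw [length_everyOther, List.length_tail, hlen]; omega
      rw [show worst_case_merge_arr (everyOther base) false = wcGo (everyOther base).length (everyOther base) false from rfl,
          show worst_case_merge_arr (everyOther base.tail) false = wcGo (everyOther base.tail).length (everyOther base.tail) false from rfl,
          wcGo_congr _ (everyOther base).length _ false hc1 (le_refl _),
          wcGo_congr _ (everyOther base.tail).length _ false hc2 (le_refl _)]
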